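-- pv_equiv track=rewrite | github.com/SikHyeya/CodingTest_SeungEon | DE_study/Programmers/230517_부족한 금액 계산하기.py | solution
-- ===== SOURCE A (Python) =====
-- def solution(price, money, count):
--     answer = 0
--     for i in range(1, count+1):
--         answer += price * i
--     if answer > money:
--         return answer - money
--     else:
--         return 0
-- ===== SOURCE B (Python) =====
-- def solution(price, money, count):
--     n = max(count, 0)
--     total = price * n * (n + 1) // 2
--     return max(total - money, 0)
-- ===== Notes on version B (the rewrite author's own statement) =====
-- stated objective: faster
-- what changed: Replaced the O(count) accumulation loop by the closed-form arithmetic-series sum price*n*(n+1)//2 and a max with 0.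
import Mathlib
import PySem

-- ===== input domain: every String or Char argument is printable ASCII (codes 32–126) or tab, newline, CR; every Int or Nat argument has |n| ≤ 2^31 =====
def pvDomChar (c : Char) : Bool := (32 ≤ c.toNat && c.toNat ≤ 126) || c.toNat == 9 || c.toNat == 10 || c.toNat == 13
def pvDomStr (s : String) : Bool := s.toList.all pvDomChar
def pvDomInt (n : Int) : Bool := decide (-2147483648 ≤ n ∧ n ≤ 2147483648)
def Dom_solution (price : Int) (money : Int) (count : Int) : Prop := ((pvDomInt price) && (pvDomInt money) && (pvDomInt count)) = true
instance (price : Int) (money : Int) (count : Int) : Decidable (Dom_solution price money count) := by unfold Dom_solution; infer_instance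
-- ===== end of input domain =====

-- B replaces A's O(count) accumulation loop by the closed-form series sum price*n*(n+1)//2 (O(1)).

-- ===== PORT A =====
def solution (price : Int) (money : Int) (count : Int) : Int :=
  let answer := (PySem.List.pyRange 1 (count + 1) 1).foldl (fun acc i => acc + price * i) 0
  if answer > money then answer - money else 0

-- ===== PORT B =====
def solution_alt (price : Int) (money : Int) (count : Int) : Int :=
  let n := max count 0
  let total := PySem.Int.floordiv (price * n * (n + 1)) 2
  max (total - money) 0

-- ===== PRECONDITION & SPEC =====
def Spec_solution (price : Int) (money : Int) (count : Int) (out : Int) : Prop := out = solution_alt price money count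
instance (price : Int) (money : Int) (count : Int) (out : Int) : Decidable (Spec_solution price money count out) := by unfold Spec_solution; infer_instance

-- ===== CLAIM (what is proved, stated in full; the proofs are below) =====
def Claim_equal_solution : Prop := ∀ (price : Int) (money : Int) (count : Int), Dom_solution price money count → Spec_solution price money count (solution price money count)

-- ===== LEMMAS AND PROOFS =====

theorem pv_sum_loop (p : Int) (n : Nat) :
    2 * ((PySem.List.pyRange 1 ((n : Int) + 1) 1).foldl (fun acc i => acc + p * i) 0)
      = p * (n : Int) * ((n : Int) + 1) := by
  induction n with
  | zero => simp [PySem.List.pyRange_one_eq_nil]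
  | succ k ih =>
      have h : ((k : Int) + 1) + 1 = ((k : Int) + 1) + 1 := rfl
      rw [show ((k + 1 : Nat) : Int) + 1 = ((k : Int) + 1) + 1 by push_cast; ring,
          PySem.List.pyRange_one_succ_right (by omega), List.foldl_append]
      simp only [List.foldl]
      push_cast
      linear_combination ih

theorem pv_sum_closed (p c : Int) :
    (PySem.List.pyRange 1 (c + 1) 1).foldl (fun acc i => acc + p * i) 0
      = PySem.Int.floordiv (p * max c 0 * (max c 0 + 1)) 2 := by
  rcases le_or_gt c 0 with h | h
  · rw [PySem.List.pyRange_one_eq_nil (by omega)]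
    have hm : max c 0 = 0 := by omega
    simp [hm, PySem.Int.floordiv]
  · have hm : max c 0 = c := by omega
    obtain ⟨n, rfl⟩ : ∃ n : Nat, c = (n : Int) := ⟨c.toNat, by omega⟩
    have h2 := pv_sum_loop p n
    rw [hm, PySem.Int.floordiv_eq_ediv_of_pos (by norm_num), ← h2,
        Int.mul_ediv_cancel_left _ (by norm_num)]

-- ===== VERDICT (by name: the statement is the Claim_ definition above) =====
theorem solution_spec : Claim_equal_solution := by
  intro price money count _
  show solution price money count = solution_alt price money count
  unfold solution solution_alt
  dsimp only
  rw [pv_sum_closed]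
  split_ifs <;> omega
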